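-- pv_equiv track=rewrite | github.com/tomisqi/advent2022 | day3p2.py | FindTriplicateItems
-- ===== SOURCE A (Python) =====
-- def GetPriorityValue(c):
--     value = ord(c) - ord('A') + 27 if ord(c) < ord('a') else ord(c) - ord('a') + 1
--     return value
--
-- def FindTriplicateItems(line0, line1, line2):
--     dic = {}
--     print ("%s %s %s" % (line0, line1, line2))
--     for c0 in line0:
--         found = False
--         for c1 in line1:
--             if ((c0 == c1) and (c0 not in dic)):
--                 for c2 in line2:
--                     if (c0 == c2):
--                         dic[c0] = GetPriorityValue(c0)
--                         found = True
--                         break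
--             if (found):
--                 break
--
--     sumValue = 0
--     for item in dic:
--         sumValue += dic[item]
--
--     return sumValue
-- ===== SOURCE B (Python) =====
-- def GetPriorityValue(c):
--     value = ord(c) - ord('A') + 27 if ord(c) < ord('a') else ord(c) - ord('a') + 1
--     return value
--
-- def FindTriplicateItems(line0, line1, line2):
--     # Set intersection of the three lines, then sum priorities.
--     # (A also prints the three lines; B returns the same value without printing.)
--     common = set(line0) & set(line1) & set(line2)
--     return sum(GetPriorityValue(c) for c in common)
-- ===== Notes on version B (the rewrite author's own statement) =====
-- stated objective: faster
-- what changed: Replaced A's triple nested character scans guarded by a dict and break flags with a direct intersection of the three lines' character sets followed by one pass summing priorities.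
import Mathlib
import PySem

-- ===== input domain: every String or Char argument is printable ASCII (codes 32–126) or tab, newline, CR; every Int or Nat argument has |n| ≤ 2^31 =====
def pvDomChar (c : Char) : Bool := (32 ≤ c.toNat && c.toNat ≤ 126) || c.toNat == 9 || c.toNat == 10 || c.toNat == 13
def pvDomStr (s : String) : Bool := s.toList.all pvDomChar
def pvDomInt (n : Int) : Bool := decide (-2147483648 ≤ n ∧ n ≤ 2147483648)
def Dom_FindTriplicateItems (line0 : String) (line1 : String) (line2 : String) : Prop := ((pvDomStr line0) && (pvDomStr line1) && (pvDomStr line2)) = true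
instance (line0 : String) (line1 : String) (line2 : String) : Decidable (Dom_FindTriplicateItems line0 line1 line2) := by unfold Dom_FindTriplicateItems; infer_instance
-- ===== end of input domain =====

-- ===== PORT A =====
-- B replaces A's triple nested scan by set intersection; equivalence is about the
-- return value only (A also prints its three arguments; B does not).

-- GetPriorityValue (shared helper of A and B, identical in both sources)
def GetPriorityValue (c : Char) : Int :=
  if (c.toNat : Int) < 97 then (c.toNat : Int) - 65 + 27 else (c.toNat : Int) - 97 + 1

-- inner 'for c2 in line2: if c0 == c2: dic[c0] = …; found = True; break'
def pvLoop2 (c0 : Char) (dic : PySem.Dict Char Int) : List Char → PySem.Dict Char Int × Bool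
  | [] => (dic, false)
  | c2 :: rest => if c0 == c2 then (dic.insert c0 (GetPriorityValue c0), true) else pvLoop2 c0 dic rest

-- middle 'for c1 in line1: if c0 == c1 and c0 not in dic: … ; if found: break'
def pvLoop1 (c0 : Char) (l2 : List Char) : List Char → PySem.Dict Char Int → PySem.Dict Char Int
  | [], dic => dic
  | c1 :: rest, dic =>
    if c0 == c1 && !(dic.contains c0) then
      match pvLoop2 c0 dic l2 with
      | (d', found) => if found then d' else pvLoop1 c0 l2 rest d'
    else pvLoop1 c0 l2 rest dic

def FindTriplicateItems (line0 : String) (line1 : String) (line2 : String) : Int :=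
  let dic := line0.toList.foldl (fun d c0 => pvLoop1 c0 line2.toList line1.toList d) PySem.Dict.empty
  -- 'for item in dic: sumValue += dic[item]' — dic[item] is exact as getD item 0 since item ∈ keys
  dic.keys.foldl (fun sumValue item => sumValue + dic.getD item 0) 0

-- ===== PORT B =====
def FindTriplicateItems_alt (line0 : String) (line1 : String) (line2 : String) : Int :=
  let common := PySem.Set.inter (PySem.Set.inter (PySem.Set.ofList line0.toList) (PySem.Set.ofList line1.toList)) (PySem.Set.ofList line2.toList)
  (common.map GetPriorityValue).sum
-- ===== PRECONDITION & SPEC =====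
def Spec_FindTriplicateItems (line0 : String) (line1 : String) (line2 : String) (out : Int) : Prop := out = FindTriplicateItems_alt line0 line1 line2
instance (line0 : String) (line1 : String) (line2 : String) (out : Int) : Decidable (Spec_FindTriplicateItems line0 line1 line2 out) := by unfold Spec_FindTriplicateItems; infer_instance

-- ===== CLAIM (what is proved, stated in full; the proofs are below) =====
def Claim_equal_FindTriplicateItems : Prop := ∀ (line0 : String) (line1 : String) (line2 : String), Dom_FindTriplicateItems line0 line1 line2 → Spec_FindTriplicateItems line0 line1 line2 (FindTriplicateItems line0 line1 line2)

-- ===== LEMMAS AND PROOFS =====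

-- the first-occurrence chars of l0 that lie in l1 and l2 and are not in `seen`
def pvFresh (l1 l2 : List Char) : List Char → List Char → List Char
  | [], _ => []
  | c :: rest, seen =>
    if c ∈ l1 ∧ c ∉ seen ∧ c ∈ l2 then c :: pvFresh l1 l2 rest (c :: seen)
    else pvFresh l1 l2 rest seen

lemma pvFresh_congr (l1 l2 : List Char) (l : List Char) :
    ∀ seen seen', (∀ x, x ∈ l1 → x ∈ l2 → (x ∈ seen ↔ x ∈ seen')) →
    pvFresh l1 l2 l seen = pvFresh l1 l2 l seen' := by
  induction l with
  | nil => intro _ _ _; rfl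
  | cons c rest ih =>
    intro seen seen' h
    by_cases hP : c ∈ l1 ∧ c ∈ l2
    · by_cases hs : c ∈ seen
      · have hs' : c ∈ seen' := (h c hP.1 hP.2).mp hs
        simp only [pvFresh]
        rw [if_neg (by tauto), if_neg (by tauto)]
        exact ih seen seen' h
      · have hs' : c ∉ seen' := fun hx => hs ((h c hP.1 hP.2).mpr hx)
        simp only [pvFresh]
        rw [if_pos ⟨hP.1, hs, hP.2⟩, if_pos ⟨hP.1, hs', hP.2⟩]
        congr 1
        exact ih _ _ (fun x hx1 hx2 => by
          simp only [List.mem_cons]; rw [h x hx1 hx2])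
    · simp only [pvFresh]
      rw [if_neg (by tauto), if_neg (by tauto)]
      exact ih seen seen' h

lemma mem_pvFresh (l1 l2 : List Char) {x : Char} :
    ∀ (l seen : List Char), x ∈ pvFresh l1 l2 l seen → x ∉ seen := by
  intro l
  induction l with
  | nil => intro seen hx; simp [pvFresh] at hx
  | cons c rest ih =>
    intro seen hx
    by_cases hc : c ∈ l1 ∧ c ∉ seen ∧ c ∈ l2
    · simp only [pvFresh, if_pos hc, List.mem_cons] at hx
      rcases hx with rfl | hx
      · exact hc.2.1
      · intro hs; exact ih (c :: seen) hx (List.mem_cons_of_mem _ hs)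
    · simp only [pvFresh, if_neg hc] at hx
      exact ih seen hx

lemma nodup_pvFresh (l1 l2 l : List Char) : ∀ seen, (pvFresh l1 l2 l seen).Nodup := by
  induction l with
  | nil => intro _; simp [pvFresh]
  | cons c rest ih =>
    intro seen
    by_cases hc : c ∈ l1 ∧ c ∉ seen ∧ c ∈ l2
    · simp only [pvFresh, if_pos hc, List.nodup_cons]
      exact ⟨fun hx => (mem_pvFresh _ _ _ _ hx) List.mem_cons_self, ih _⟩
    · simp only [pvFresh, if_neg hc]; exact ih _

lemma pvLoop2_eq (c0 : Char) (d : PySem.Dict Char Int) (l2 : List Char) :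
    pvLoop2 c0 d l2 = if c0 ∈ l2 then (d.insert c0 (GetPriorityValue c0), true) else (d, false) := by
  induction l2 with
  | nil => simp [pvLoop2]
  | cons c2 rest ih =>
    by_cases h : c0 = c2
    · subst h; simp [pvLoop2]
    · simp [pvLoop2, h, ih]

lemma pvLoop1_eq (c0 : Char) (l2 l1 : List Char) (d : PySem.Dict Char Int) :
    pvLoop1 c0 l2 l1 d =
      if c0 ∈ l1 ∧ d.contains c0 = false ∧ c0 ∈ l2 then d.insert c0 (GetPriorityValue c0) else d := by
  induction l1 generalizing d with
  | nil => simp [pvLoop1]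
  | cons c1 rest ih =>
    by_cases hcont : d.contains c0 = true
    · have hb : (c0 == c1 && !d.contains c0) = false := by simp [hcont]
      simp only [pvLoop1]
      rw [hb, if_neg (by simp), ih, if_neg (by simp [hcont]), if_neg (by simp [hcont])]
    · have hfalse : d.contains c0 = false := by revert hcont; cases d.contains c0 <;> simp
      by_cases heq : c0 = c1
      · subst heq
        have hb : (c0 == c0 && !d.contains c0) = true := by simp [hfalse]
        by_cases h2 : c0 ∈ l2
        · simp [pvLoop1, pvLoop2_eq, h2, hfalse]
        · simp [pvLoop1, pvLoop2_eq, h2, ih, hfalse]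
      · have hb : (c0 == c1 && !d.contains c0) = false := by simp [heq]
        simp only [pvLoop1]
        rw [hb, if_neg (by simp), ih]
        by_cases hr : c0 ∈ rest ∧ c0 ∈ l2
        · rw [if_pos ⟨hr.1, hfalse, hr.2⟩, if_pos ⟨List.mem_cons_of_mem _ hr.1, hfalse, hr.2⟩]
        · rw [if_neg (by tauto), if_neg (by
            rintro ⟨hm, -, h2⟩
            rcases List.mem_cons.mp hm with rfl | hm
            · exact heq rfl
            · exact hr ⟨hm, h2⟩)]

lemma pvFold_items (l1 l2 : List Char) (l0 : List Char) :
    ∀ d : PySem.Dict Char Int, d.keys.Nodup →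
    (l0.foldl (fun d c0 => pvLoop1 c0 l2 l1 d) d).items
      = d.items ++ (pvFresh l1 l2 l0 d.keys).map (fun c => (c, GetPriorityValue c)) := by
  induction l0 with
  | nil => intro d _; simp [pvFresh]
  | cons c rest ih =>
    intro d hnd
    have hmem : d.contains c = false ↔ c ∉ d.keys := by
      rw [← PySem.Dict.contains_iff_mem_keys (d := d) (k := c)]
      cases d.contains c <;> simp
    rw [List.foldl_cons, pvLoop1_eq c l2 l1 d]
    by_cases hc : c ∈ l1 ∧ d.contains c = false ∧ c ∈ l2
    · have hnc : c ∉ d.keys := hmem.mp hc.2.1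
      rw [if_pos hc, ih _ (PySem.Dict.nodup_keys_insert d c _ hnd),
          PySem.Dict.items_insert_of_not_contains d _ hc.2.1,
          PySem.Dict.keys_insert_of_not_contains d _ hc.2.1]
      have hfr : pvFresh l1 l2 rest (d.keys ++ [c]) = pvFresh l1 l2 rest (c :: d.keys) :=
        pvFresh_congr _ _ _ _ _ (fun x _ _ => by simp [or_comm])
      rw [hfr]
      simp only [pvFresh]
      rw [if_pos ⟨hc.1, hnc, hc.2.2⟩]
      simp
    · rw [if_neg hc, ih d hnd]
      have : ¬ (c ∈ l1 ∧ c ∉ d.keys ∧ c ∈ l2) := by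
        intro h; exact hc ⟨h.1, hmem.mpr h.2.1, h.2.2⟩
      simp only [pvFresh, if_neg this]

lemma pvUpdate_prefix (l : List Char) : ∀ s : List Char, ∃ u, PySem.Set.update s l = s ++ u := by
  induction l with
  | nil => intro s; exact ⟨[], by simp [PySem.Set.update]⟩
  | cons c rest ih =>
    intro s
    by_cases hc : PySem.Set.contains s c = true
    · obtain ⟨u, hu⟩ := ih s
      refine ⟨u, ?_⟩
      simp only [PySem.Set.update, List.foldl_cons] at hu ⊢
      rw [show PySem.Set.add s c = s from by rw [PySem.Set.add, if_pos hc]]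
      exact hu
    · obtain ⟨u, hu⟩ := ih (s ++ [c])
      refine ⟨c :: u, ?_⟩
      simp only [PySem.Set.update, List.foldl_cons] at hu ⊢
      rw [show PySem.Set.add s c = s ++ [c] from by rw [PySem.Set.add, if_neg hc]]
      rw [hu]
      simp

lemma pvUpdate_fresh (l1 l2 : List Char) (l0 : List Char) :
    ∀ seen : List Char,
    ((PySem.Set.update seen l0).drop seen.length).filter
        (fun c => decide (c ∈ l1) && decide (c ∈ l2))
      = pvFresh l1 l2 l0 seen := by
  induction l0 with
  | nil => intro seen; simp [PySem.Set.update, pvFresh]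
  | cons c rest ih =>
    intro seen
    have hstep : PySem.Set.update seen (c :: rest) = PySem.Set.update (PySem.Set.add seen c) rest := by
      simp [PySem.Set.update]
    by_cases hc : c ∈ seen
    · have : PySem.Set.add seen c = seen := by
        simp [PySem.Set.add, PySem.Set.contains, hc]
      rw [hstep, this, ih seen]
      simp only [pvFresh]
      rw [if_neg (by tauto)]
    · have hadd : PySem.Set.add seen c = seen ++ [c] := by
        simp [PySem.Set.add, PySem.Set.contains, hc]
      obtain ⟨u, hu⟩ := pvUpdate_prefix rest (seen ++ [c])
      have hdrop : (PySem.Set.update (seen ++ [c]) rest).drop seen.length = c :: u := by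
        rw [hu, List.append_assoc, List.drop_left]
        simp
      have hdrop' : (PySem.Set.update (seen ++ [c]) rest).drop (seen ++ [c]).length = u := by
        rw [hu, List.drop_left]
      have hih := ih (seen ++ [c])
      rw [hdrop'] at hih
      rw [hstep, hadd, hdrop]
      by_cases hP : c ∈ l1 ∧ c ∈ l2
      · have hfr : pvFresh l1 l2 rest (seen ++ [c]) = pvFresh l1 l2 rest (c :: seen) :=
          pvFresh_congr _ _ _ _ _ (fun x _ _ => by simp [or_comm])
        simp only [pvFresh]
        rw [if_pos ⟨hP.1, hc, hP.2⟩, List.filter_cons]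
        simp only [decide_eq_true hP.1, decide_eq_true hP.2, Bool.and_self, if_true]
        rw [hih, hfr]
      · have hfr : pvFresh l1 l2 rest (seen ++ [c]) = pvFresh l1 l2 rest seen :=
          pvFresh_congr _ _ _ _ _ (fun x hx1 hx2 => by
            simp only [List.mem_append, List.mem_singleton]
            constructor
            · rintro (h | rfl)
              · exact h
              · exact absurd ⟨hx1, hx2⟩ hP
            · exact fun h => Or.inl h)
        simp only [pvFresh]
        rw [if_neg (by tauto), ← hfr, ← hih, List.filter_cons]
        have : (decide (c ∈ l1) && decide (c ∈ l2)) = false := by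
          rcases not_and_or.mp hP with h | h <;> simp [h]
        rw [this]
        simp

-- ===== VERDICT (by name: the statement is the Claim_ definition above) =====
theorem FindTriplicateItems_spec : Claim_equal_FindTriplicateItems := by
  intro line0 line1 line2 _
  unfold Spec_FindTriplicateItems FindTriplicateItems FindTriplicateItems_alt
  dsimp only
  set l0 := line0.toList with hl0
  set l1 := line1.toList with hl1
  set l2 := line2.toList with hl2
  set dic := l0.foldl (fun d c0 => pvLoop1 c0 l2 l1 d) PySem.Dict.empty with hdic
  set L := pvFresh l1 l2 l0 [] with hL
  have hitems : dic.items = L.map (fun c => (c, GetPriorityValue c)) := by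
    rw [hdic, pvFold_items l1 l2 l0 PySem.Dict.empty List.nodup_nil]
    rfl
  have hkeys : dic.keys = L := by
    simp only [PySem.Dict.keys, hitems, List.map_map]
    simp [Function.comp_def]
  have hnodup : dic.keys.Nodup := by rw [hkeys]; exact nodup_pvFresh l1 l2 l0 []
  have hgetD : ∀ k ∈ L, dic.getD k 0 = GetPriorityValue k := by
    intro k hk
    exact PySem.Dict.getD_of_mem_items dic (by rw [hitems]; exact List.mem_map_of_mem hk) hnodup 0
  have hcommon : PySem.Set.inter (PySem.Set.inter (PySem.Set.ofList l0) (PySem.Set.ofList l1)) (PySem.Set.ofList l2) = L := by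
    have h0 := pvUpdate_fresh l1 l2 l0 []
    simp only [List.length_nil, List.drop_zero] at h0
    rw [show PySem.Set.update [] l0 = PySem.Set.ofList l0 from rfl] at h0
    show List.filter _ (List.filter _ (PySem.Set.ofList l0)) = L
    rw [List.filter_filter, hL, ← h0]
    apply List.filter_congr
    intro x _
    simp [PySem.Set.contains, PySem.Set.mem_ofList, Bool.and_comm]
  rw [hkeys, hcommon]
  rw [PySem.List.foldl_congr_mem L _ (fun s k => s + GetPriorityValue k) 0
    (fun acc k hk => by rw [hgetD k hk])]
  rw [PySem.List.foldl_add L GetPriorityValue 0]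
  simp
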